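-- pv_equiv track=rewrite | github.com/Dr0x3525/Proyecto-final-programacion | ejercicios_parciales/ejercicios_recuperacion_parcial_2/ejercicio_4.py | encontrar_primo_2
-- ===== SOURCE A (Python) =====
-- def encontrar_primo_2(vector):
--     contador_primos = 0
--     for indice in range(len(vector)):
--         numero = vector[indice]
--         if Comprobar_ser_primo(numero):
--             contador_primos += 1
--             if contador_primos == 2:
--                 return indice
--     return None
--
-- def Comprobar_ser_primo(numero):
--     numero = int(numero)
--     if numero <= 1:
--         return False
--     else:
--         if numero == 2:
--             return True
--         else:
--             for i in range(2,numero-1):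
--                 if numero % i  == 0:
--                     return False
--             return True
-- ===== SOURCE B (Python) =====
-- def _es_primo(n):
--     n = int(n)
--     if n < 2:
--         return False
--     d = 2
--     while d * d <= n:
--         if n % d == 0:
--             return False
--         d += 1
--     return True
--
-- def encontrar_primo_2(vector):
--     primos = (i for i, x in enumerate(vector) if _es_primo(x))
--     next(primos, None)
--     return next(primos, None)
-- ===== Notes on version B (the rewrite author's own statement) =====
-- stated objective: alternative
-- what changed: Primality is decided by trial division only up to sqrt(n) in a while-loop instead of scanning all candidate divisors 2..n-2, and the second prime's index is taken as the second element of a generator filtering enumerate instead of an index loop with a counter.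
import Mathlib
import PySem

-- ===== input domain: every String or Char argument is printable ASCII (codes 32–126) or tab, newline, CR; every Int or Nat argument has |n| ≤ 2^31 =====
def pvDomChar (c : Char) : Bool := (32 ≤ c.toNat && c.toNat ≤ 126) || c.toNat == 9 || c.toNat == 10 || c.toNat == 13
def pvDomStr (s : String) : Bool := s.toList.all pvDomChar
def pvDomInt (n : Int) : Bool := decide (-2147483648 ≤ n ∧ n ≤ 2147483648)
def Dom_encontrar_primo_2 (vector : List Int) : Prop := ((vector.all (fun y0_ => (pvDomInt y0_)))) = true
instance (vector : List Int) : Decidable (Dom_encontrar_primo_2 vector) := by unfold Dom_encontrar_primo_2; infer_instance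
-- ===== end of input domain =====

-- B decides primality by trial division up to sqrt(n) and picks the second prime
-- index from a filtering generator over enumerate; objective: alternative.

-- ===== PORT A =====
-- inner loop of Comprobar_ser_primo: 'for i in range(2, numero-1): if numero % i == 0: return False'
def comprobarLoop (numero : Int) : List Int → Bool
  | [] => true
  | i :: rest => if PySem.Int.mod numero i == 0 then false else comprobarLoop numero rest

def Comprobar_ser_primo (numero : Int) : Bool :=
  if numero ≤ 1 then false
  else if numero == 2 then true
  else comprobarLoop numero (PySem.List.pyRange 2 (numero - 1) 1)

-- the 'for indice in range(len(vector))' loop carrying contador_primos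
def loopA (vector : List Int) : List Int → Int → Option Int
  | [], _ => none
  | indice :: rest, contador =>
    match PySem.List.pyGet? vector indice with
    | none => none   -- unreachable: indice comes from range(len(vector))
    | some numero =>
      if Comprobar_ser_primo numero then
        if contador + 1 == 2 then some indice
        else loopA vector rest (contador + 1)
      else loopA vector rest contador

def encontrar_primo_2 (vector : List Int) : Option Int :=
  loopA vector (PySem.List.pyRange 0 (vector.length : Int) 1) 0

-- ===== PORT B =====
-- 'while d * d <= n: if n % d == 0: return False; d += 1'
def primoAltLoop (n : Int) (d : Int) : Bool :=
  if h : d * d ≤ n then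
    if PySem.Int.mod n d == 0 then false
    else primoAltLoop n (d + 1)
  else true
termination_by (n + 1 - d).toNat
decreasing_by
  have h2 : d ≤ d * d := by nlinarith [mul_self_nonneg d]
  omega

def es_primo_alt (n : Int) : Bool :=
  if n < 2 then false else primoAltLoop n 2

-- the generator '(i for i, x in enumerate(vector) if _es_primo(x))' advanced twice
def encontrar_primo_2_alt (vector : List Int) : Option Int :=
  match (PySem.List.enumerate vector 0).filter (fun p => es_primo_alt p.2) with
  | _ :: p :: _ => some p.1
  | _ => none

-- ===== PRECONDITION & SPEC =====
def Spec_encontrar_primo_2 (vector : List Int) (out : Option Int) : Prop := out = encontrar_primo_2_alt vector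
instance (vector : List Int) (out : Option Int) : Decidable (Spec_encontrar_primo_2 vector out) := by unfold Spec_encontrar_primo_2; infer_instance

-- ===== CLAIM (what is proved, stated in full; the proofs are below) =====
def Claim_equal_encontrar_primo_2 : Prop := ∀ (vector : List Int), Dom_encontrar_primo_2 vector → Spec_encontrar_primo_2 vector (encontrar_primo_2 vector)

-- ===== LEMMAS AND PROOFS =====

theorem comprobarLoop_eq_true (n : Int) (l : List Int) :
    comprobarLoop n l = true ↔ ∀ i ∈ l, ¬ i ∣ n := by
  induction l with
  | nil => simp [comprobarLoop]
  | cons i rest ih =>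
    simp only [comprobarLoop]
    by_cases h : PySem.Int.mod n i = 0
    · have : i ∣ n := (PySem.Int.mod_eq_zero_iff_dvd n i).mp h
      simp [h, this]
    · have hnd : ¬ i ∣ n := fun hd => h ((PySem.Int.mod_eq_zero_iff_dvd n i).mpr hd)
      simp [h, ih, hnd]

theorem primoAltLoop_eq_true (n : Int) (d : Int) : 0 ≤ d →
    (primoAltLoop n d = true ↔ ∀ e : Int, d ≤ e → e * e ≤ n → ¬ e ∣ n) := by
  induction d using primoAltLoop.induct n with
  | case1 d h hm =>
    intro _
    rw [primoAltLoop, dif_pos h, if_pos hm]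
    simp only [Bool.false_eq_true, false_iff]
    push_neg
    exact ⟨d, le_refl d, h, (PySem.Int.mod_eq_zero_iff_dvd n d).mp (by simpa using hm)⟩
  | case2 d h hm ih =>
    intro hd0
    rw [primoAltLoop, dif_pos h, if_neg hm, ih (by omega)]
    constructor
    · intro hall e hde hee
      rcases (show d = e ∨ d < e by omega) with rfl | hlt
      · exact fun hd => (by simpa using hm : ¬ PySem.Int.mod n d = 0)
          ((PySem.Int.mod_eq_zero_iff_dvd n d).mpr hd)
      · exact hall e (by omega) hee
    · intro hall e hde hee
      exact hall e (by omega) hee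
  | case3 d h =>
    intro hd0
    rw [primoAltLoop, dif_neg h]
    constructor
    · intro _ e hde hee hdvd
      have : d * d ≤ e * e := by nlinarith
      omega
    · intro _; rfl

-- a number n ≥ 3 with no divisor e, 2 ≤ e, e*e ≤ n, has no divisor in [2, n-1)
theorem no_small_dvd (n : Int) (hn : 3 ≤ n)
    (h : ∀ e : Int, 2 ≤ e → e * e ≤ n → ¬ e ∣ n) :
    ∀ i : Int, 2 ≤ i → i < n - 1 → ¬ i ∣ n := by
  intro i h2i hilt hdvd
  obtain ⟨k, hk⟩ := hdvd
  have hipos : 0 < i := by omega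
  have hkpos : 0 < k := by nlinarith
  have hk2 : 2 ≤ k := by
    rcases (show k = 1 ∨ 2 ≤ k by omega) with rfl | hge
    · omega
    · exact hge
  rcases (show i * i ≤ n ∨ n < i * i by omega) with hii | hii
  · exact h i h2i hii ⟨k, hk⟩
  · have hkk : k * k ≤ n := by nlinarith
    exact h k hk2 hkk ⟨i, by linarith [hk, mul_comm i k]⟩

theorem prime_test_eq (n : Int) : Comprobar_ser_primo n = es_primo_alt n := by
  unfold Comprobar_ser_primo es_primo_alt
  by_cases h1 : n ≤ 1
  · simp [h1, show n < 2 by omega]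
  · by_cases h2 : n = 2
    · subst h2
      norm_num
      rw [primoAltLoop]
      norm_num
    · have hn : 3 ≤ n := by omega
      rw [if_neg h1, if_neg (by simpa using h2), if_neg (show ¬ n < 2 by omega)]
      rw [Bool.eq_iff_iff, comprobarLoop_eq_true, primoAltLoop_eq_true n 2 (by omega)]
      constructor
      · intro hall e h2e hee
        have he2 : 2 * e ≤ e * e := by nlinarith
        exact hall e (by rw [PySem.List.mem_pyRange_one]; omega)
      · intro hall i hi
        rw [PySem.List.mem_pyRange_one] at hi
        exact no_small_dvd n hn hall i hi.1 (by omega)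

-- outer-loop invariant: starting at position pre.length with counter c ∈ {0,1},
-- loopA returns the (2-c)-th prime index of the remaining suffix
theorem loopA_eq (rest : List Int) : ∀ (pre : List Int) (k c : Int),
    k = (pre.length : Int) → c = 0 ∨ c = 1 →
    loopA (pre ++ rest) (PySem.List.pyRange k ((pre ++ rest).length : Int) 1) c
      = (((PySem.List.enumerate rest k).filter
            (fun p => es_primo_alt p.2)).map (·.1))[(1 - c).toNat]? := by
  induction rest with
  | nil =>
    intro pre k c hk _
    subst hk
    rw [PySem.List.pyRange_one_eq_nil (by simp)]
    simp [loopA, PySem.List.enumerate_nil]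
  | cons x rest ih =>
    intro pre k c hk hc
    have hlen : k < ((pre ++ x :: rest).length : Int) := by
      subst hk; simp
    rw [PySem.List.pyRange_one_cons hlen, hk]
    simp only [loopA, PySem.List.pyGet?_append_length]
    rw [PySem.List.enumerate_cons, prime_test_eq x, ← hk]
    have hl : (pre ++ [x]) ++ rest = pre ++ x :: rest := by simp
    have hk' : k + 1 = (((pre ++ [x]).length : Nat) : Int) := by
      subst hk; simp
    have key := ih (pre ++ [x]) (k + 1)
    rw [hl, ← hk'] at key
    by_cases hp : es_primo_alt x = true
    · simp only [hp, if_true, List.filter_cons, List.map_cons]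
      rcases hc with rfl | rfl
      · rw [if_neg (by norm_num)]
        have h2 := key 1 rfl (Or.inr rfl)
        norm_num at h2 ⊢
        simpa using h2
      · rw [if_pos (by norm_num)]
        norm_num
    · simp only [hp, Bool.false_eq_true, if_false, List.filter_cons]
      exact key c rfl hc

-- ===== VERDICT (by name: the statement is the Claim_ definition above) =====
theorem encontrar_primo_2_spec : Claim_equal_encontrar_primo_2 := by
  intro vector _
  unfold Spec_encontrar_primo_2 encontrar_primo_2 encontrar_primo_2_alt
  have := loopA_eq vector [] 0 0 (by simp) (Or.inl rfl)
  simp only [List.nil_append] at this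
  rw [this]
  rcases hF : (PySem.List.enumerate vector 0).filter (fun p => es_primo_alt p.2) with _ | ⟨a, _ | ⟨b, l⟩⟩ <;>
    simp [hF]
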